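-- pv_equiv track=rewrite | github.com/Sharpiro/tools | interactive_scripts/python/main.py | rs1024_polymod
-- ===== SOURCE A (Python) =====
-- def rs1024_polymod(values: list[int]):
--     GEN = [
--         0xE0E040,
--         0x1C1C080,
--         0x3838100,
--         0x7070200,
--         0xE0E0009,
--         0x1C0C2412,
--         0x38086C24,
--         0x3090FC48,
--         0x21B1F890,
--         0x3F3F120,
--     ]
--     chk = 1
--     for v in values:
--         b = chk >> 20
--         chk = (chk & 0xFFFFF) << 10 ^ v
--         for i in range(10):
--             chk ^= GEN[i] if ((b >> i) & 1) else 0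
--     return chk
-- ===== SOURCE B (Python) =====
-- GEN = [
--     0xE0E040,
--     0x1C1C080,
--     0x3838100,
--     0x7070200,
--     0xE0E0009,
--     0x1C0C2412,
--     0x38086C24,
--     0x3090FC48,
--     0x21B1F890,
--     0x3F3F120,
-- ]
--
-- # 1024-entry table: _T[x] = XOR of GEN[i] over the set bits i of x,
-- # built once by doubling (one pass over GEN).
-- _T = [0]
-- for _g in GEN:
--     _T = _T + [t ^ _g for t in _T]
--
--
-- def rs1024_polymod(values: list[int]):
--     chk = 1
--     for v in values:
--         chk = ((chk & 0xFFFFF) << 10) ^ v ^ _T[(chk >> 20) & 0x3FF]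
--     return chk
-- ===== Notes on version B (the rewrite author's own statement) =====
-- stated objective: faster
-- what changed: A's 10-iteration inner bit loop per value is replaced by a single lookup into a 1024-entry XOR table (T[x] = XOR of GEN[i] over set bits i of x) built once by doubling, with the index masked by & 0x3FF.
import Mathlib
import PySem

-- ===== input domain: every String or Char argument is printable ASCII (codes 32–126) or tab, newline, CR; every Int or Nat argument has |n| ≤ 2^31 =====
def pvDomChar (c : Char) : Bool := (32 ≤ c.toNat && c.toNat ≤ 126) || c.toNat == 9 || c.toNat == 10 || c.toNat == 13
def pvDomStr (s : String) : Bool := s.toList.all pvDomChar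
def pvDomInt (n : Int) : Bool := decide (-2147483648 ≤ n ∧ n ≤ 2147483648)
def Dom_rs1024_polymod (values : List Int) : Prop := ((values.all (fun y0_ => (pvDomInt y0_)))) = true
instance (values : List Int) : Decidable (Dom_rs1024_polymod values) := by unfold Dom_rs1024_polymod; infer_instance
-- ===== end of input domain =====

-- B replaces A's 10-iteration inner bit loop by a single lookup in a 1024-entry XOR
-- table built once by doubling over GEN (index masked with & 0x3FF).

-- ===== PORT A =====
-- the GEN constant (defined at the top of the Python function body)
def pvGEN : List Int :=
  [0xE0E040, 0x1C1C080, 0x3838100, 0x7070200, 0xE0E0009,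
   0x1C0C2412, 0x38086C24, 0x3090FC48, 0x21B1F890, 0x3F3F120]

def rs1024_polymod (values : List Int) : Int :=
  values.foldl (fun chk v =>
    let b := chk >>> 20
    let chk1 := PySem.Int.bxor ((PySem.Int.band chk 0xFFFFF) <<< 10) v
    -- for i in range(10): chk ^= GEN[i] if ((b >> i) & 1) else 0
    -- (i runs over 0..9, so `i.toNat` is exact for Python's `b >> i`)
    (PySem.List.pyRange 0 10).foldl (fun c i =>
      PySem.Int.bxor c
        (if PySem.Int.band (b >>> i.toNat) 1 ≠ 0 then PySem.List.pyGetD pvGEN i 0 else 0))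
      chk1) 1

-- ===== PORT B =====
-- _T = [0]
-- for g in GEN: _T = _T + [t ^ g for t in _T]
def pvTable : List Int :=
  pvGEN.foldl (fun T g => T ++ T.map (fun t => PySem.Int.bxor t g)) [0]

def rs1024_polymod_alt (values : List Int) : Int :=
  values.foldl (fun chk v =>
    PySem.Int.bxor
      (PySem.Int.bxor ((PySem.Int.band chk 0xFFFFF) <<< 10) v)
      (PySem.List.pyGetD pvTable (PySem.Int.band (chk >>> 20) 0x3FF) 0)) 1

-- ===== PRECONDITION & SPEC =====
def Spec_rs1024_polymod (values : List Int) (out : Int) : Prop := out = rs1024_polymod_alt values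
instance (values : List Int) (out : Int) : Decidable (Spec_rs1024_polymod values out) := by unfold Spec_rs1024_polymod; infer_instance

-- ===== CLAIM (what is proved, stated in full; the proofs are below) =====
def Claim_equal_rs1024_polymod : Prop := ∀ (values : List Int), Dom_rs1024_polymod values → Spec_rs1024_polymod values (rs1024_polymod values)

-- ===== LEMMAS AND PROOFS =====

theorem pv_nat_mask (m : Nat) : m &&& 1023 = m % 1024 := by
  have := Nat.and_two_pow_sub_one_eq_mod m 10
  norm_num at this; exact this

-- PySem.Int.bxor is Mathlib's Int.xor
theorem pv_bxor_eq_xor (a b : Int) : PySem.Int.bxor a b = Int.xor a b := by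
  rcases a with m | m <;> rcases b with n | n <;>
    simp [PySem.Int.bxor, Int.xor, Int.negSucc_eq] <;> omega

theorem pv_xor_assoc (a b c : Int) : Int.xor (Int.xor a b) c = Int.xor a (Int.xor b c) := by
  rcases a with m | m <;> rcases b with n | n <;> rcases c with k | k <;>
    simp [Int.xor, Nat.xor_assoc]

theorem pv_bxor_left_assoc (c x y : Int) :
    PySem.Int.bxor (PySem.Int.bxor c x) y = PySem.Int.bxor c (PySem.Int.bxor x y) := by
  simp only [pv_bxor_eq_xor]; exact pv_xor_assoc c x y

-- Python's  b & 1023  is  b % 1024  (floor mod), for every Int b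
theorem pv_band_mask (b : Int) : PySem.Int.band b 1023 = b % 1024 := by
  rcases b with m | m <;> simp [PySem.Int.band, Int.negSucc_eq]
  · rw [pv_nat_mask]; omega
  · rw [if_neg (by omega), Nat.and_comm, pv_nat_mask]
    have := Nat.mod_lt m (show 0 < 1024 by norm_num)
    omega

-- the table lookup computes A's ten-term XOR, for every index below 1024
set_option maxRecDepth 100000 in
set_option maxHeartbeats 4000000 in
theorem pv_table_ok : ∀ n : Nat, n < 1024 →
    PySem.Int.bxor (if (n:Int) >>> (0:Nat) % 2 ≠ 0 then PySem.List.pyGetD pvGEN 0 0 else 0)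
      (PySem.Int.bxor (if (n:Int) >>> (1:Nat) % 2 ≠ 0 then PySem.List.pyGetD pvGEN 1 0 else 0)
      (PySem.Int.bxor (if (n:Int) >>> (2:Nat) % 2 ≠ 0 then PySem.List.pyGetD pvGEN 2 0 else 0)
      (PySem.Int.bxor (if (n:Int) >>> (3:Nat) % 2 ≠ 0 then PySem.List.pyGetD pvGEN 3 0 else 0)
      (PySem.Int.bxor (if (n:Int) >>> (4:Nat) % 2 ≠ 0 then PySem.List.pyGetD pvGEN 4 0 else 0)
      (PySem.Int.bxor (if (n:Int) >>> (5:Nat) % 2 ≠ 0 then PySem.List.pyGetD pvGEN 5 0 else 0)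
      (PySem.Int.bxor (if (n:Int) >>> (6:Nat) % 2 ≠ 0 then PySem.List.pyGetD pvGEN 6 0 else 0)
      (PySem.Int.bxor (if (n:Int) >>> (7:Nat) % 2 ≠ 0 then PySem.List.pyGetD pvGEN 7 0 else 0)
      (PySem.Int.bxor (if (n:Int) >>> (8:Nat) % 2 ≠ 0 then PySem.List.pyGetD pvGEN 8 0 else 0)
        (if (n:Int) >>> (9:Nat) % 2 ≠ 0 then PySem.List.pyGetD pvGEN 9 0 else 0))))))))) =
    PySem.List.pyGetD pvTable (n:Int) 0 := by
  decide

-- A's inner loop over the bits of b equals B's single masked table lookup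
set_option maxRecDepth 40000 in
theorem pv_inner (b c1 : Int) :
    (PySem.List.pyRange 0 10).foldl (fun c i =>
      PySem.Int.bxor c
        (if PySem.Int.band (b >>> i.toNat) 1 ≠ 0 then PySem.List.pyGetD pvGEN i 0 else 0))
      c1 =
    PySem.Int.bxor c1 (PySem.List.pyGetD pvTable (PySem.Int.band b 0x3FF) 0) := by
  have hnn : 0 ≤ b % 1024 := Int.emod_nonneg b (by norm_num)
  obtain ⟨n, hn⟩ : ∃ n : Nat, b % 1024 = (n : Int) :=
    ⟨(b % 1024).toNat, (Int.toNat_of_nonneg hnn).symm⟩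
  have hlt : n < 1024 := by
    have := Int.emod_lt_of_pos b (show (0:Int) < 1024 by norm_num); omega
  have hb1 : ∀ a : Int, PySem.Int.band a 1 = a % 2 := fun a => by
    rw [PySem.Int.band_one]
    exact PySem.Int.mod_eq_emod_of_pos (by norm_num)
  have hsh : ∀ k : Nat, k < 10 → b >>> k % 2 = (n:Int) >>> k % 2 := by
    intro k hk
    rw [Int.shiftRight_eq_div_pow, Int.shiftRight_eq_div_pow]
    interval_cases k <;> norm_num <;> omega
  rw [show PySem.List.pyRange 0 10 = [0,1,2,3,4,5,6,7,8,9] from by decide]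
  simp only [List.foldl, hb1,
    show ((0:Int).toNat = 0) from rfl, show ((1:Int).toNat = 1) from rfl,
    show ((2:Int).toNat = 2) from rfl, show ((3:Int).toNat = 3) from rfl,
    show ((4:Int).toNat = 4) from rfl, show ((5:Int).toNat = 5) from rfl,
    show ((6:Int).toNat = 6) from rfl, show ((7:Int).toNat = 7) from rfl,
    show ((8:Int).toNat = 8) from rfl, show ((9:Int).toNat = 9) from rfl,
    Int.shiftRight_natCast_right]
  simp only [hsh 0 (by norm_num), hsh 1 (by norm_num), hsh 2 (by norm_num),
    hsh 3 (by norm_num), hsh 4 (by norm_num), hsh 5 (by norm_num), hsh 6 (by norm_num),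
    hsh 7 (by norm_num), hsh 8 (by norm_num), hsh 9 (by norm_num)]
  rw [show (0x3FF : Int) = 1023 from rfl, pv_band_mask, hn]
  simp only [pv_bxor_left_assoc]
  congr 1
  exact pv_table_ok n hlt

-- ===== VERDICT (by name: the statement is the Claim_ definition above) =====
theorem rs1024_polymod_spec : Claim_equal_rs1024_polymod := by
  intro values _
  unfold Spec_rs1024_polymod rs1024_polymod rs1024_polymod_alt
  congr 1
  funext chk v
  exact pv_inner (chk >>> 20) (PySem.Int.bxor ((PySem.Int.band chk 0xFFFFF) <<< 10) v)
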